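-- pv_equiv track=rewrite | github.com/Pederaa/Advent-of-code | 2025/4. desember/task2attampt2.py | remove_bales
-- ===== SOURCE A (Python) =====
-- def count_surrounding_bales(state, y, x):
--     bales_num = 0
--     surrounding = [state[i][max(0, x-1):min(len(state[0]), x+2)]
--                    for i in range(max(0, y-1), min(y+2, len(state)))]
--     bales_num = "".join(surrounding).count("@")
--     return bales_num
--
-- def remove_bales(state):
--     to_remove = []
--
--     for y in range(len(state)):
--         for x in range(len(state[0])-1):
--             if state[y][x] == '.':
--                 continue
--
--             count = count_surrounding_bales(state, y, x)
--             if count < 4+1: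
--                 to_remove.append((y, x))
--
--     balesToRemoveCount = 0
--     for y, x in to_remove:
--         state[y] = state[y][:x] + '.' + state[y][x+1:]
--         balesToRemoveCount += 1
--
--     return state, balesToRemoveCount
-- ===== SOURCE B (Python) =====
-- # Alternative algorithm: per-row prefix sums of '@' replace the slice/join/count inner scans; rows are
-- # rewritten in one pass instead of collecting (y,x) pairs and patching afterwards.
-- # Like A, mutates the passed-in list in place (state[:] = ...) and returns it.
-- def remove_bales(state):
--     n = len(state)
--     if n == 0:
--         return state, 0
--     W = len(state[0])
--     pref = []
--     for row in state:
--         p = [0]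
--         for j in range(W):
--             p.append(p[-1] + (1 if j < len(row) and row[j] == '@' else 0))
--         pref.append(p)
--     removed = 0
--     new_rows = []
--     for y in range(n):
--         row = state[y]
--         chars = list(row)
--         lo, hi = max(0, y - 1), min(n, y + 2)
--         for x in range(W - 1):
--             if row[x] != '.':
--                 x0, x1 = max(0, x - 1), min(W, x + 2)
--                 if sum(pref[i][x1] - pref[i][x0] for i in range(lo, hi)) < 5:
--                     chars[x] = '.'
--                     removed += 1
--         new_rows.append(''.join(chars))
--     state[:] = new_rows
--     return state, removed
-- ===== Notes on version B (the rewrite author's own statement) =====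
-- stated objective: alternative
-- what changed: B builds per-row prefix sums of '@' once and reads each clamped neighbour window as prefix differences, rewriting each row in a single pass, instead of A's per-cell string slicing/join/count and its two-phase to_remove coordinate list.
import Mathlib
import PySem

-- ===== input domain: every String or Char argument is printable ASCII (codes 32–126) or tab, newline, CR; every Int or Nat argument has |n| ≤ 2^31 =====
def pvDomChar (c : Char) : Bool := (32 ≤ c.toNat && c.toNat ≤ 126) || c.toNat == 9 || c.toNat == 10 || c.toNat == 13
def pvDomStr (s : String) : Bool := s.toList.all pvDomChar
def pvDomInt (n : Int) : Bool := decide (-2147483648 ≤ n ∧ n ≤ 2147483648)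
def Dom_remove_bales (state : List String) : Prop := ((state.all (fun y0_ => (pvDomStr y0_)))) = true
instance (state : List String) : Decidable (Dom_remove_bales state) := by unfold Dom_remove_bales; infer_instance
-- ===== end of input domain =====

-- B replaces A's per-cell slice/join/count by per-row prefix sums and a one-pass row rewrite (alternative algorithm, same asymptotic cost).
-- Both A and B mutate the caller's list in place in Python; the equivalence proved here is about the return value.

-- ===== PORT A =====
-- string concatenation of slices is ported on toList via List append (exact: String.toList distributes over ++)
def count_surrounding_bales (state : List String) (y x : Int) : Int :=
  let surrounding : List String :=
    (PySem.List.pyRange (max 0 (y - 1)) (min (y + 2) (state.length : Int)) 1).map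
      (fun i => PySem.Str.slice (PySem.List.pyGetD state i "")
        (some (max 0 (x - 1)))
        (some (min ((PySem.Str.len (PySem.List.pyGetD state 0 "")) : Int) (x + 2))))
  (PySem.Str.count (PySem.Str.join "" surrounding) "@" : Int)

def remove_bales (state : List String) : List String × Int :=
  let to_remove : List (Int × Int) :=
    (PySem.List.pyRange 0 (state.length : Int) 1).foldl (fun acc y =>
      (PySem.List.pyRange 0 (((PySem.Str.len (PySem.List.pyGetD state 0 "")) : Int) - 1) 1).foldl (fun acc x =>
        if ((PySem.Str.pyGet? (PySem.List.pyGetD state y "") x).getD ' ') = '.' then acc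
        else if count_surrounding_bales state y x < 4 + 1 then acc ++ [(y, x)] else acc) acc) []
  let res : List String × Int :=
    to_remove.foldl (fun p yx =>
      let row := (PySem.List.pyGetD p.1 yx.1 "").toList
      let newRow := String.ofList
        (PySem.List.slice row none (some yx.2) ++ ['.'] ++ PySem.List.slice row (some (yx.2 + 1)) none)
      (PySem.List.pySetD p.1 yx.1 newRow, p.2 + 1)) (state, 0)
  res

-- ===== PORT B =====
def prefRow (row : List Char) (W : Int) : List Int :=
  (PySem.List.pyRange 0 W 1).foldl (fun p j =>
    p ++ [PySem.List.pyGetD p (-1) 0 +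
      (if j < (row.length : Int) then (if (PySem.List.pyGet? row j).getD ' ' = '@' then 1 else 0) else 0)]) [0]

def remove_bales_alt (state : List String) : List String × Int :=
  if state.length = 0 then (state, 0) else
  let n := state.length
  let W : Int := PySem.Str.len (PySem.List.pyGetD state 0 "")
  let pref : List (List Int) := state.map (fun row => prefRow row.toList W)
  let res : List String × Int :=
    (PySem.List.pyRange 0 (n : Int) 1).foldl (fun (acc : List String × Int) y =>
      let row := (PySem.List.pyGetD state y "").toList
      let lo := max 0 (y - 1)
      let hi := min (n : Int) (y + 2)
      let inner : List Char × Int :=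
        (PySem.List.pyRange 0 (W - 1) 1).foldl (fun (ac : List Char × Int) x =>
          if ((PySem.List.pyGet? row x).getD ' ') ≠ '.' then
            let x0 := max 0 (x - 1)
            let x1 := min W (x + 2)
            let s := (PySem.List.pyRange lo hi 1).foldl (fun s i =>
              s + (PySem.List.pyGetD (PySem.List.pyGetD pref i []) x1 0 -
                   PySem.List.pyGetD (PySem.List.pyGetD pref i []) x0 0)) 0
            if s < 5 then (PySem.List.pySetD ac.1 x '.', ac.2 + 1) else ac
          else ac) (row, acc.2)
      (acc.1 ++ [String.ofList inner.1], inner.2)) ([], 0)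
  res

-- ===== PRECONDITION & SPEC =====
-- Pre_ excludes exactly the inputs on which A raises IndexError: some row shorter
-- than len(state[0]) - 1 makes A's state[y][x] access go out of range.
def Pre_remove_bales (state : List String) : Prop :=
  ∀ row ∈ state, (state.headD "").length - 1 ≤ row.length

instance (state : List String) : Decidable (Pre_remove_bales state) := by
  unfold Pre_remove_bales; infer_instance

def pvWitness_remove_bales : List String := ["@@", "@@"]

def Spec_remove_bales (state : List String) (out : List String × Int) : Prop := out = remove_bales_alt state
instance (state : List String) (out : List String × Int) : Decidable (Spec_remove_bales state out) := by unfold Spec_remove_bales; infer_instance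

-- ===== CLAIM (what is proved, stated in full; the proofs are below) =====
def Claim_equal_remove_bales : Prop := ∀ (state : List String), Dom_remove_bales state → Pre_remove_bales state → Spec_remove_bales state (remove_bales state)


-- ===== LEMMAS AND PROOFS =====

-- proof-layer helpers
def rowC (state : List String) (y : Int) : List Char := (PySem.List.pyGetD state y "").toList

def indA (r : List Char) (j : Nat) : Int :=
  if h : j < r.length then (if r[j] = '@' then 1 else 0) else 0

def ccZ (r : List Char) (b : Nat) : Int := ((List.range b).map (indA r)).sum

abbrev wLen (state : List String) : Int := PySem.Str.len (PySem.List.pyGetD state 0 "")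

def winSum (state : List String) (y x : Int) : Int :=
  ((PySem.List.pyRange (max 0 (y - 1)) (min (y + 2) (state.length : Int)) 1).map (fun i =>
    ccZ (rowC state i) (min (wLen state) (x + 2)).toNat -
    ccZ (rowC state i) (max 0 (x - 1)).toNat)).sum

def cellCond (state : List String) (y x : Int) : Bool :=
  (!((PySem.List.pyGet? (rowC state y) x).getD ' ' == '.')) && decide (winSum state y x < 5)

def mxs (state : List String) (y : Int) : List Int :=
  (PySem.List.pyRange 0 (wLen state - 1) 1).filter (fun x => cellCond state y x)

def applyXs (r : List Char) (xs : List Int) : List Char :=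
  xs.foldl (fun r x => PySem.List.pySetD r x '.') r

def newRowS (state : List String) (y : Int) : String :=
  String.ofList (applyXs (rowC state y) (mxs state y))

theorem ccZ_succ (r : List Char) (b : Nat) : ccZ r (b + 1) = ccZ r b + indA r b := by
  simp [ccZ, List.range_succ]

theorem ccZ_eq_count_take (r : List Char) (b : Nat) :
    ccZ r b = (((r.take b).count '@' : Nat) : Int) := by
  induction b with
  | zero => simp [ccZ]
  | succ b ih =>
    rw [ccZ_succ, ih]
    by_cases hb : b < r.length
    · rw [List.take_add_one, List.getElem?_eq_getElem hb]
      simp only [Option.toList_some, List.count_append]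
      by_cases h : r[b] = '@' <;> simp [indA, hb, h]
    · have h1 : r.length <= b := by omega
      rw [List.take_of_length_le h1, List.take_of_length_le (by omega)]
      simp [indA, hb]

theorem count_slice_eq (r : List Char) (a b : Nat) (h : a <= b) :
    ((((r.drop a).take (b - a)).count '@' : Nat) : Int) = ccZ r b - ccZ r a := by
  rw [ccZ_eq_count_take, ccZ_eq_count_take]
  have hb : b = a + (b - a) := by omega
  have : r.take b = r.take a ++ (r.drop a).take (b - a) := by
    rw [hb, List.take_add]; simp
  rw [this, List.count_append]
  push_cast; omega

theorem count_go_singleton (c : Char) :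
    ∀ (fuel : Nat) (l : List Char) (acc : Nat), l.length <= fuel →
      PySem.Chars.count.go [c] fuel l acc = acc + l.count c := by
  intro fuel
  induction fuel with
  | zero =>
    intro l acc h
    have : l = [] := by
      cases l with
      | nil => rfl
      | cons a t => simp at h
    subst this; simp [PySem.Chars.count.go]
  | succ f ih =>
    intro l acc h
    cases l with
    | nil => simp [PySem.Chars.count.go]
    | cons a t =>
      rw [PySem.Chars.count.go]
      by_cases hac : a = c
      · simp [List.isPrefixOf, hac, ih t (acc + 1) (by simpa using Nat.lt_succ_iff.mp (by simpa using h))]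
        omega
      · simp [List.isPrefixOf, hac, ih t acc (by simpa using Nat.lt_succ_iff.mp (by simpa using h))]
        intro h'; exact absurd h'.symm hac

theorem chars_count_singleton (cs : List Char) (c : Char) :
    PySem.Chars.count cs [c] = cs.count c := by
  have : ([c] : List Char).isEmpty = false := rfl
  rw [PySem.Chars.count]
  simp [this, count_go_singleton c cs.length cs 0 le_rfl]

theorem join_empty_flatten (ls : List (List Char)) : PySem.Chars.join [] ls = ls.flatten := by
  rw [PySem.Chars.join, List.intercalate]
  induction ls with
  | nil => simp
  | cons a t ih =>
    cases t with
    | nil => simp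
    | cons b t2 => simpa using ih

theorem csb_eq_winSum (state : List String) (y x : Int)
    (hx0 : 0 <= x) (hx1 : x < wLen state - 1) :
    count_surrounding_bales state y x = winSum state y x := by
  unfold count_surrounding_bales winSum
  dsimp only
  have hW0 : 0 <= wLen state := by
    simp [wLen, PySem.Str.len_eq]
  rw [PySem.Str.count_eq, PySem.Str.toList_join]
  have : ("" : String).toList = [] := rfl
  rw [this, join_empty_flatten]
  have h2 : ("@" : String).toList = ['@'] := rfl
  rw [h2, chars_count_singleton, List.count_flatten, List.map_map, List.map_map]
  rw [Nat.cast_list_sum, List.map_map]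
  congr 1
  apply List.map_congr_left
  intro i hi
  simp only [Function.comp]
  have hab : (max 0 (x - 1)).toNat <= (min (wLen state) (x + 2)).toNat := by
    simp [wLen, PySem.Str.len_eq] at hW0 hx1 ⊢
    omega
  rw [← count_slice_eq _ _ _ hab]
  congr 1
  have htl : (PySem.Str.slice (PySem.List.pyGetD state i "")
      (some (max 0 (x - 1)))
      (some (min ((PySem.Str.len (PySem.List.pyGetD state 0 "")) : Int) (x + 2)))).toList =
      PySem.List.slice (PySem.List.pyGetD state i "").toList
        (some (max 0 (x - 1))) (some (min (wLen state) (x + 2))) := by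
    simp [PySem.Str.toList_slice, wLen]
  rw [htl, PySem.List.slice_toNat _ (by omega) (by omega)]
  rfl

theorem prefRow_eq (r : List Char) (w : Nat) :
    prefRow r (w : Int) = (List.range (w + 1)).map (ccZ r) := by
  induction w with
  | zero => simp [prefRow, PySem.List.pyRange_one_eq_nil le_rfl, ccZ]
  | succ w ih =>
    unfold prefRow at ih ⊢
    have hcast : ((w + 1 : Nat) : Int) = (w : Int) + 1 := by push_cast; ring
    rw [hcast, PySem.List.pyRange_one_succ_right (by positivity), List.foldl_append, ih]
    have hne : (List.range (w + 1)).map (ccZ r) ≠ [] := by simp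
    have hlast : PySem.List.pyGetD ((List.range (w + 1)).map (ccZ r)) (-1) 0 = ccZ r w := by
      rw [PySem.List.pyGetD_neg_one _ _ hne, List.getLast_eq_getElem]
      simp
    have hind : (if (w : Int) < (r.length : Int) then
        (if (PySem.List.pyGet? r (w : Int)).getD ' ' = '@' then (1 : Int) else 0) else 0) = indA r w := by
      by_cases hw : w < r.length
      · simp [indA, hw]
      · simp [indA, hw, show ¬((w : Int) < (r.length : Int)) by exact_mod_cast hw]
    simp only [List.foldl_cons, List.foldl_nil, hlast, hind]
    rw [List.range_succ (n := w + 1), List.map_append]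
    simp [ccZ_succ]

theorem prefRow_lookup (r : List Char) (w : Nat) (k : Int) (h0 : 0 <= k) (hk : k <= (w : Int)) :
    PySem.List.pyGetD (prefRow r (w : Int)) k 0 = ccZ r k.toNat := by
  rw [prefRow_eq]
  rw [PySem.List.pyGetD_eq_getElem _ _ h0 (by simp; omega)]
  simp

theorem pair_filter_fold {ι α : Type} (l : List ι) (p : ι → Bool) (g : α → ι → α) (r : α) (c : Int) :
    l.foldl (fun ac x => if p x then (g ac.1 x, ac.2 + 1) else ac) (r, c) =
      ((l.filter p).foldl g r, c + ((l.filter p).length : Int)) := by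
  induction l generalizing r c with
  | nil => simp
  | cons a t ih =>
    by_cases hp : p a
    · simp only [List.foldl_cons, List.filter_cons, hp, ih]
      simp; ring
    · simp [hp, ih]

theorem splice_eq_set (r : List Char) (x : Int) (h0 : 0 <= x) (hx : x.toNat < r.length) :
    PySem.List.slice r none (some x) ++ ['.'] ++ PySem.List.slice r (some (x + 1)) none =
      r.set x.toNat '.' := by
  rw [PySem.List.slice_to r h0, PySem.List.slice_from r (by omega : (0:Int) ≤ x + 1)]
  have hx1 : (x + 1).toNat = x.toNat + 1 := by omega
  rw [hx1, List.set_eq_take_append_cons_drop]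
  simp [hx]

theorem range_set_fold {α : Type} (f : Nat → α) :
    ∀ (k : Nat) (l : List α), k <= l.length →
    (List.range k).foldl (fun s y => s.set y (f y)) l = (List.range k).map f ++ l.drop k := by
  intro k
  induction k with
  | zero => simp
  | succ k ih =>
    intro l hk
    rw [List.range_succ, List.foldl_append, ih l (by omega)]
    simp only [List.foldl_cons, List.foldl_nil]
    have hdrop : l.drop k = l[k] :: l.drop (k + 1) := List.drop_eq_getElem_cons (by omega)
    rw [hdrop, List.map_append, List.set_append]
    simp only [List.length_map, List.length_range, lt_self_iff_false, if_false,
      Nat.sub_self, List.set_cons_zero]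
    simp

def stepA (p : List String × Int) (yx : Int × Int) : List String × Int :=
  let row := (PySem.List.pyGetD p.1 yx.1 "").toList
  (PySem.List.pySetD p.1 yx.1 (String.ofList
    (PySem.List.slice row none (some yx.2) ++ ['.'] ++ PySem.List.slice row (some (yx.2 + 1)) none)),
   p.2 + 1)

theorem groupFold (k : Nat) :
    ∀ (xs : List Int) (st' : List String) (c : Int), k < st'.length →
      (∀ x ∈ xs, 0 <= x ∧ x.toNat < (PySem.List.pyGetD st' (k : Int) "").toList.length) →
      (xs.map (fun x => ((k : Int), x))).foldl stepA (st', c) =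
        (PySem.List.pySetD st' (k : Int)
          (String.ofList (applyXs (PySem.List.pyGetD st' (k : Int) "").toList xs)), c + xs.length) := by
  intro xs
  induction xs with
  | nil =>
    intro st' c hk _
    simp only [List.map_nil, List.foldl_nil, applyXs, String.ofList_toList]
    have : PySem.List.pySetD st' (k : Int) (PySem.List.pyGetD st' (k : Int) "") = st' := by
      rw [PySem.List.pySetD_natCast, PySem.List.pyGetD_natCast, List.getD_eq_getElem _ _ hk,
        List.set_getElem_self hk]
    rw [this]; simp
  | cons x t ih =>
    intro st' c hk hxs
    obtain ⟨hx0, hxlt⟩ := hxs x (by simp)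
    simp only [List.map_cons, List.foldl_cons]
    have hstep : stepA (st', c) ((k : Int), x) =
        (PySem.List.pySetD st' (k : Int)
          (String.ofList ((PySem.List.pyGetD st' (k : Int) "").toList.set x.toNat '.')), c + 1) := by
      simp only [stepA]
      rw [splice_eq_set _ _ hx0 hxlt]
    rw [hstep]
    have hlen' : k < (PySem.List.pySetD st' (k : Int)
        (String.ofList ((PySem.List.pyGetD st' (k : Int) "").toList.set x.toNat '.'))).length := by
      rw [PySem.List.length_pySetD]; exact hk
    have hrow : PySem.List.pyGetD (PySem.List.pySetD st' (k : Int)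
        (String.ofList ((PySem.List.pyGetD st' (k : Int) "").toList.set x.toNat '.'))) (k : Int) "" =
        String.ofList ((PySem.List.pyGetD st' (k : Int) "").toList.set x.toNat '.') := by
      rw [PySem.List.pyGetD_pySetD_natCast _ _ _ _ _ hk]; simp
    rw [ih _ _ hlen' (by
      intro z hz
      obtain ⟨hz0, hzlt⟩ := hxs z (by simp [hz])
      refine ⟨hz0, ?_⟩
      rw [hrow, String.toList_ofList, List.length_set]
      exact hzlt)]
    rw [hrow, String.toList_ofList]
    have hset : PySem.List.pySetD (PySem.List.pySetD st' (k : Int)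
        (String.ofList ((PySem.List.pyGetD st' (k : Int) "").toList.set x.toNat '.'))) (k : Int)
        (String.ofList (applyXs ((PySem.List.pyGetD st' (k : Int) "").toList.set x.toNat '.') t)) =
        PySem.List.pySetD st' (k : Int)
          (String.ofList (applyXs ((PySem.List.pyGetD st' (k : Int) "").toList.set x.toNat '.') t)) := by
      rw [PySem.List.pySetD_natCast, PySem.List.pySetD_natCast, PySem.List.pySetD_natCast,
        List.set_set]
    rw [hset]
    have happ : applyXs (PySem.List.pyGetD st' (k : Int) "").toList (x :: t) =
        applyXs ((PySem.List.pyGetD st' (k : Int) "").toList.set x.toNat '.') t := by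
      simp only [applyXs, List.foldl_cons]
      rw [PySem.List.pySetD_of_nonneg _ _ hx0]
    rw [happ]
    refine Prod.ext rfl ?_
    simp; ring

theorem mem_mxs (state : List String) (y x : Int) (h : x ∈ mxs state y) :
    0 <= x ∧ x < wLen state - 1 ∧ cellCond state y x = true := by
  unfold mxs at h
  rw [List.mem_filter] at h
  obtain ⟨h1, h2⟩ := h
  rw [PySem.List.mem_pyRange_one] at h1
  exact ⟨h1.1, h1.2, h2⟩

theorem rowLen_ge (state : List String) (hPre : Pre_remove_bales state) (i : Int)
    (h0 : 0 <= i) (hn : i < (state.length : Int)) :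
    wLen state - 1 <= ((rowC state i).length : Int) := by
  have hmem : PySem.List.pyGetD state i "" ∈ state :=
    PySem.List.pyGetD_mem state "" (by constructor <;> omega)
  have hpre := hPre _ hmem
  have hhead : state.headD "" = PySem.List.pyGetD state 0 "" := by
    cases state with
    | nil => simp at hn; omega
    | cons a t => simp [PySem.List.pyGetD_zero]
  rw [hhead] at hpre
  simp only [wLen, PySem.Str.len_eq, rowC]
  have h1 : (PySem.List.pyGetD state 0 "").toList.length = (PySem.List.pyGetD state 0 "").length := by
    exact String.length_toList
  have h2 : (PySem.List.pyGetD state i "").toList.length = (PySem.List.pyGetD state i "").length := by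
    exact String.length_toList
  rw [h1, h2]
  omega

theorem toRemove_eq (state : List String) :
    (PySem.List.pyRange 0 (state.length : Int) 1).foldl (fun acc y =>
      (PySem.List.pyRange 0 (((PySem.Str.len (PySem.List.pyGetD state 0 "")) : Int) - 1) 1).foldl (fun acc x =>
        if ((PySem.Str.pyGet? (PySem.List.pyGetD state y "") x).getD ' ') = '.' then acc
        else if count_surrounding_bales state y x < 4 + 1 then acc ++ [(y, x)] else acc) acc)
      ([] : List (Int × Int)) =
    (PySem.List.pyRange 0 (state.length : Int) 1).flatMap
      (fun y => (mxs state y).map (fun x => (y, x))) := by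
  rw [PySem.List.foldl_congr_mem' (g := fun acc y => acc ++ (mxs state y).map (fun x => (y, x)))]
  · rw [PySem.List.foldl_append_eq_flatMap]
    simp
  · intro y hy acc
    rw [PySem.List.mem_pyRange_one] at hy
    rw [PySem.List.foldl_congr_mem' (g := fun acc x =>
      if cellCond state y x then acc ++ [(y, x)] else acc)]
    · exact PySem.List.foldl_append_if _ _ _ _
    · intro x hx acc'
      rw [PySem.List.mem_pyRange_one] at hx
      have hcsb := csb_eq_winSum state y x hx.1 (by
        simpa [wLen] using hx.2)
      have hchar : ((PySem.Str.pyGet? (PySem.List.pyGetD state y "") x).getD ' ') =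
          ((PySem.List.pyGet? (rowC state y) x).getD ' ') := by
        simp [rowC]
      rw [hchar, hcsb]
      unfold cellCond
      by_cases h1 : ((PySem.List.pyGet? (rowC state y) x).getD ' ') = '.'
      · simp [h1]
      · by_cases h2 : winSum state y x < 5
        · simp [h1, h2]
        · simp [h1, h2]

theorem groupsFold (state : List String) (hPre : Pre_remove_bales state) :
    ∀ (m k : Nat) (st' : List String) (c : Int), k + m = state.length →
      st'.length = state.length →
      (∀ j : Nat, k <= j → j < state.length →
        PySem.List.pyGetD st' (j : Int) "" = PySem.List.pyGetD state (j : Int) "") →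
      ((PySem.List.pyRange (k : Int) (state.length : Int) 1).flatMap
        (fun y => (mxs state y).map (fun x => (y, x)))).foldl stepA (st', c) =
      ((PySem.List.pyRange (k : Int) (state.length : Int) 1).foldl
          (fun s y => PySem.List.pySetD s y (newRowS state y)) st',
        c + ((PySem.List.pyRange (k : Int) (state.length : Int) 1).map
          (fun y => ((mxs state y).length : Int))).sum) := by
  intro m
  induction m with
  | zero =>
    intro k st' c hkm hlen hrows
    have : (state.length : Int) <= (k : Int) := by omega
    rw [PySem.List.pyRange_one_eq_nil this]
    simp
  | succ m ih =>
    intro k st' c hkm hlen hrows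
    have hkn : (k : Int) < (state.length : Int) := by omega
    rw [PySem.List.pyRange_one_cons hkn]
    simp only [List.flatMap_cons, List.foldl_append, List.foldl_cons, List.map_cons, List.sum_cons]
    have hrowk := hrows k le_rfl (by omega)
    have hbound : ∀ x ∈ mxs state (k : Int),
        0 <= x ∧ x.toNat < (PySem.List.pyGetD st' (k : Int) "").toList.length := by
      intro x hx
      obtain ⟨hx0, hxw, _⟩ := mem_mxs state _ x hx
      refine ⟨hx0, ?_⟩
      have hlge := rowLen_ge state hPre (k : Int) (by positivity) hkn
      rw [hrowk]
      simp only [rowC] at hlge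
      omega
    rw [groupFold k (mxs state (k : Int)) st' c (by omega) hbound]
    have hnewrow : String.ofList (applyXs (PySem.List.pyGetD st' (k : Int) "").toList
        (mxs state (k : Int))) = newRowS state (k : Int) := by
      rw [hrowk]; rfl
    rw [hnewrow]
    have hcast : ((k : Int) + 1) = ((k + 1 : Nat) : Int) := by push_cast; ring
    rw [hcast]
    rw [ih (k + 1) (PySem.List.pySetD st' (k : Int) (newRowS state (k : Int)))
      (c + ((mxs state (k : Int)).length : Int)) (by omega)
      (by rw [PySem.List.length_pySetD]; exact hlen)
      (by
        intro j hj hjn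
        rw [PySem.List.pyGetD_pySetD_natCast _ _ _ _ _ (by omega)]
        rw [if_neg (by omega)]
        exact hrows j (by omega) hjn)]
    refine Prod.ext rfl ?_
    simp; ring

theorem setsFold_eq_map (state : List String) :
    (PySem.List.pyRange 0 (state.length : Int) 1).foldl
      (fun s y => PySem.List.pySetD s y (newRowS state y)) state =
    (List.range state.length).map (fun (j : Nat) => newRowS state (j : Int)) := by
  rw [PySem.List.pyRange_one]
  have h1 : ((state.length : Int) - 0).toNat = state.length := by omega
  rw [h1, List.foldl_map]
  simp only [zero_add, PySem.List.pySetD_natCast]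
  rw [range_set_fold (fun j => newRowS state (j : Int)) state.length state le_rfl]
  simp

theorem remove_bales_eq (state : List String) (hPre : Pre_remove_bales state) :
    remove_bales state =
      ((List.range state.length).map (fun (j : Nat) => newRowS state (j : Int)),
       ((PySem.List.pyRange 0 (state.length : Int) 1).map
         (fun y => ((mxs state y).length : Int))).sum) := by
  unfold remove_bales
  dsimp only
  rw [toRemove_eq]
  show List.foldl stepA (state, (((0 : Nat)) : Int))
      ((PySem.List.pyRange (((0 : Nat)) : Int) (state.length : Int) 1).flatMap
        (fun y => (mxs state y).map (fun x => (y, x)))) = _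
  rw [groupsFold state hPre state.length 0 state (((0 : Nat)) : Int) (by omega) rfl
    (by intro j _ _; rfl)]
  simp only [Nat.cast_zero]
  rw [setsFold_eq_map state]
  simp

theorem altInnerEq (state : List String) (y : Int)
    (hy0 : 0 <= y) (hyn : y < (state.length : Int)) (c : Int) :
    (PySem.List.pyRange 0 (wLen state - 1) 1).foldl (fun (ac : List Char × Int) x =>
      if ((PySem.List.pyGet? (PySem.List.pyGetD state y "").toList x).getD ' ') ≠ '.' then
        (if ((PySem.List.pyRange (max 0 (y - 1)) (min ((state.length : Int)) (y + 2)) 1).foldl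
            (fun s i =>
              s + (PySem.List.pyGetD (PySem.List.pyGetD
                      (state.map (fun row => prefRow row.toList (wLen state))) i [])
                    (min (wLen state) (x + 2)) 0 -
                   PySem.List.pyGetD (PySem.List.pyGetD
                      (state.map (fun row => prefRow row.toList (wLen state))) i [])
                    (max 0 (x - 1)) 0)) 0) < 5
         then (PySem.List.pySetD ac.1 x '.', ac.2 + 1) else ac)
      else ac) ((PySem.List.pyGetD state y "").toList, c)
    = (applyXs (rowC state y) (mxs state y), c + ((mxs state y).length : Int)) := by
  refine Eq.trans (PySem.List.foldl_congr_mem _ _ (fun (ac : List Char × Int) x =>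
    if cellCond state y x then (PySem.List.pySetD ac.1 x '.', ac.2 + 1) else ac) _ ?_) ?_
  · intro ac x hx
    rw [PySem.List.mem_pyRange_one] at hx
    have hW0 : (0 : Int) <= wLen state := by simp [wLen, PySem.Str.len_eq]
    have hs : (PySem.List.pyRange (max 0 (y - 1)) (min ((state.length : Int)) (y + 2)) 1).foldl
        (fun s i =>
          s + (PySem.List.pyGetD (PySem.List.pyGetD
                  (state.map (fun row => prefRow row.toList (wLen state))) i [])
                (min (wLen state) (x + 2)) 0 -
               PySem.List.pyGetD (PySem.List.pyGetD
                  (state.map (fun row => prefRow row.toList (wLen state))) i [])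
                (max 0 (x - 1)) 0)) 0 = winSum state y x := by
      rw [PySem.List.foldl_add]
      rw [min_comm ((state.length : Int)) (y + 2)]
      unfold winSum
      rw [zero_add]
      apply congrArg
      apply List.map_congr_left
      intro i hi
      rw [PySem.List.mem_pyRange_one] at hi
      obtain ⟨hia, hib⟩ := hi
      have hi0 : 0 <= i := by omega
      have hin : i < (state.length : Int) := by omega
      have hplen : i < ((state.map (fun row => prefRow row.toList (wLen state))).length : Int) := by
        simpa using hin
      rw [PySem.List.pyGetD_eq_getElem _ _ hi0 hplen]
      rw [List.getElem_map]
      have hwnat : wLen state = (((PySem.List.pyGetD state 0 "").toList.length : Nat) : Int) := by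
        simp [wLen, PySem.Str.len_eq]
      have hrow : state[i.toNat]'(by omega) = PySem.List.pyGetD state i "" := by
        rw [PySem.List.pyGetD_eq_getElem _ _ hi0 (by omega)]
      rw [hrow, hwnat]
      rw [prefRow_lookup _ _ _ (by omega) (by rw [← hwnat]; omega),
          prefRow_lookup _ _ _ (by positivity) (by rw [← hwnat]; simp [wLen, PySem.Str.len_eq] at hx ⊢; omega)]
      rfl
    rw [hs]
    unfold cellCond
    by_cases h1 : ((PySem.List.pyGet? (rowC state y) x).getD ' ') = '.'
    · simp [rowC] at h1 ⊢
      simp [h1]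
    · by_cases h2 : winSum state y x < 5
      · simp only [rowC] at h1 ⊢
        simp [h1, h2]
      · simp only [rowC] at h1 ⊢
        simp [h1, h2]
  · rw [pair_filter_fold _ _ (fun (r : List Char) (x : Int) => PySem.List.pySetD r x '.')]
    rfl

theorem altLoop (state : List String) (F : List String × Int → Int → List String × Int)
    (hF : ∀ (acc : List String × Int) (y : Int), 0 <= y → y < (state.length : Int) →
      F acc y = (acc.1 ++ [newRowS state y], acc.2 + ((mxs state y).length : Int))) :
    ∀ (m k : Nat), k + m = state.length → ∀ (rows : List String) (c : Int),
      (PySem.List.pyRange (k : Int) (state.length : Int) 1).foldl F (rows, c) =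
        (rows ++ (PySem.List.pyRange (k : Int) (state.length : Int) 1).map
            (fun y => newRowS state y),
         c + ((PySem.List.pyRange (k : Int) (state.length : Int) 1).map
            (fun y => ((mxs state y).length : Int))).sum) := by
  intro m
  induction m with
  | zero =>
    intro k hk rows c
    rw [PySem.List.pyRange_one_eq_nil (by omega)]
    simp
  | succ m ih =>
    intro k hk rows c
    have hkn : (k : Int) < (state.length : Int) := by omega
    rw [PySem.List.pyRange_one_cons hkn]
    simp only [List.foldl_cons, List.map_cons, List.sum_cons]
    rw [hF (rows, c) (k : Int) (by positivity) hkn]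
    have hcast : ((k : Int) + 1) = ((k + 1 : Nat) : Int) := by push_cast; ring
    rw [hcast, ih (k + 1) (by omega)]
    refine Prod.ext ?_ ?_
    · simp
    · simp; ring

theorem remove_bales_alt_eq (state : List String) (hn : state.length ≠ 0) :
    remove_bales_alt state =
      ((PySem.List.pyRange 0 (state.length : Int) 1).map (fun y => newRowS state y),
       ((PySem.List.pyRange 0 (state.length : Int) 1).map
         (fun y => ((mxs state y).length : Int))).sum) := by
  unfold remove_bales_alt
  rw [if_neg hn]
  dsimp only
  show List.foldl _ (([] : List String), (0 : Int))
    (PySem.List.pyRange ((0 : Nat) : Int) (state.length : Int) 1) = _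
  refine Eq.trans (altLoop state _ ?_ state.length 0 (by omega) [] 0) ?_
  · intro acc y hy0 hyn
    dsimp only
    rw [altInnerEq state y hy0 hyn acc.2]
    rfl
  · simp

-- ===== VERDICT (by name: the statement is the Claim_ definition above) =====
theorem remove_bales_spec : Claim_equal_remove_bales := by
  intro state _ hPre
  unfold Spec_remove_bales
  by_cases hn : state.length = 0
  · have hst : state = [] := List.length_eq_zero_iff.mp hn
    subst hst
    rfl
  · rw [remove_bales_eq state hPre, remove_bales_alt_eq state hn]
    refine Prod.ext ?_ rfl
    show (List.range state.length).map (fun (j : Nat) => newRowS state (j : Int)) =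
      (PySem.List.pyRange 0 (state.length : Int) 1).map (fun y => newRowS state y)
    rw [PySem.List.pyRange_one, List.map_map]
    have h1 : ((state.length : Int) - 0).toNat = state.length := by omega
    rw [h1]
    apply List.map_congr_left
    intro j _
    simp
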